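-- pv_equiv track=rewrite | github.com/Victor-wind/USACO-Silver | solution/2020/jan/loan.py | check_condition_optimized
-- ===== SOURCE A (Python) =====
-- def check_condition_optimized(N, K, M, x):
--     remains = N
--     days = 0
--     while remains > 0:
--         y = remains // x
--         if y <= M: # from here, all following loan payments are M gallons, could complete the calculation.
--             days += (remains//M)
--             if remains % M != 0:
--                 days += 1
--             return days <= K
--         # how many following transitions that leave y unchanged
--         # for example remains: 290, X = 100, -> y = 2. It could have 45 y=2 while remains >= 200
--         extra_gallons = remains - y*x
--         days_followed = extra_gallons//y
--         if extra_gallons % y == 0: # one more y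
--             days_followed += 1
--         if days_followed == 0: #  for example:  remains=202, X = 10, -> y = 20,  extra_gallons=2, days_followed=0
--             days_followed = 1
--         days += days_followed
--         remains -= (y * days_followed)
--         if days > K: return False
--     return True
-- ===== SOURCE B (Python) =====
-- def check_condition_optimized(N, K, M, x):
--     remains = N
--     days = 0
--     while remains > 0:
--         days += 1
--         if days > K:
--             return False
--         q = remains // x
--         remains -= q if q > M else M
--     return True
-- ===== Notes on version B (the rewrite author's own statement) =====
-- stated objective: simpler
-- what changed: B replaces A's sqrt(N)-style equal-quotient block grouping (with its block-length mod tests, zero patch and a separate closed-form tail phase) by a direct day-by-day simulation that maintains only (remains, days), pays max(remains//x, M) once per day and exits as soon as days exceed K.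
-- outside the precondition, e.g. on check_condition_optimized(5, 3, 0, 1): A returns True, B returns True; on check_condition_optimized(1, 0, -1, -1): A returns True, B returns False; on check_condition_optimized(7, 3, 0, 2): A raises ZeroDivisionError, B returns False
import Mathlib
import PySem

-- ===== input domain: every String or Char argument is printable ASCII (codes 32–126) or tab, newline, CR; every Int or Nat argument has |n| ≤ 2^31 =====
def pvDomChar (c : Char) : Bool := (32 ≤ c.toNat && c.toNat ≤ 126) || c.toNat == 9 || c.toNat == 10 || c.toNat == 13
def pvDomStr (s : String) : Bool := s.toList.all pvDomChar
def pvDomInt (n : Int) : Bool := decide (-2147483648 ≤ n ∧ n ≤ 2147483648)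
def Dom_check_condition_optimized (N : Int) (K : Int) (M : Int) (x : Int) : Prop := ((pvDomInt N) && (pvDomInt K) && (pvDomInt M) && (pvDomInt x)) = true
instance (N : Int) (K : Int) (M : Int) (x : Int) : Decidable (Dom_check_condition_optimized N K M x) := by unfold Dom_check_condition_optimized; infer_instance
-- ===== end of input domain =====

-- B replaces A's equal-quotient block grouping by a direct day-by-day simulation
-- maintaining only (remains, days), paying max(remains//x, M) once per day; objective: simpler.

-- ===== PORT A =====
-- the fuel argument only makes the recursion total (N.toNat + 1 steps always suffice on
-- admitted inputs, where the payment is positive); the 'fuel = 0' arm is never reached there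
def pvALoop (fuel : Nat) (K M x : Int) (remains days : Int) : Bool :=
  match fuel with
  | 0 => false
  | fuel + 1 =>
    if 0 < remains then
      let y := PySem.Int.floordiv remains x
      if y ≤ M then
        let days1 := days + PySem.Int.floordiv remains M
        let days2 := if PySem.Int.mod remains M ≠ 0 then days1 + 1 else days1
        decide (days2 ≤ K)
      else
        let extra := remains - y * x
        let df0 := PySem.Int.floordiv extra y
        let df1 := if PySem.Int.mod extra y = 0 then df0 + 1 else df0
        let df := if df1 = 0 then 1 else df1
        let days' := days + df
        let remains' := remains - y * df
        if days' > K then false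
        else pvALoop fuel K M x remains' days'
    else true

def check_condition_optimized (N : Int) (K : Int) (M : Int) (x : Int) : Bool :=
  pvALoop (N.toNat + 1) K M x N 0

-- ===== PORT B =====
-- fuel only makes the recursion total: each day pays at least 1 gallon on admitted inputs
def pvBLoop (fuel : Nat) (K M x : Int) (remains days : Int) : Bool :=
  match fuel with
  | 0 => false
  | fuel + 1 =>
    if 0 < remains then
      let days' := days + 1
      if days' > K then false
      else
        let q := PySem.Int.floordiv remains x
        pvBLoop fuel K M x (remains - (if q > M then q else M)) days'
    else true

def check_condition_optimized_alt (N : Int) (K : Int) (M : Int) (x : Int) : Bool :=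
  pvBLoop (N.toNat + 1) K M x N 0

-- ===== PRECONDITION & SPEC =====
-- Pre_ keeps the loan problem's natural domain (payment M ≥ 1, divisor x ≠ 0), plus all
-- trivially repaid N ≤ 0; outside it A raises ZeroDivisionError on almost every N > 0
-- input (remains//M with M = 0, extra_gallons//y with y = 0, remains//x with x = 0), the
-- few M ≤ 0 inputs where A still returns get their value from accidental negative
-- floor-divisions, and B's day-by-day loop would not terminate there.
def Pre_check_condition_optimized (N : Int) (K : Int) (M : Int) (x : Int) : Prop :=
  N ≤ 0 ∨ (1 ≤ M ∧ x ≠ 0)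
instance (N : Int) (K : Int) (M : Int) (x : Int) : Decidable (Pre_check_condition_optimized N K M x) := by unfold Pre_check_condition_optimized; infer_instance

def pvWitness_check_condition_optimized : Int × Int × Int × Int := (12, 4, 2, 3)

def Spec_check_condition_optimized (N : Int) (K : Int) (M : Int) (x : Int) (out : Bool) : Prop := out = check_condition_optimized_alt N K M x
instance (N : Int) (K : Int) (M : Int) (x : Int) (out : Bool) : Decidable (Spec_check_condition_optimized N K M x out) := by unfold Spec_check_condition_optimized; infer_instance

-- ===== CLAIM (what is proved, stated in full; the proofs are below) =====
def Claim_equal_check_condition_optimized : Prop := ∀ (N : Int) (K : Int) (M : Int) (x : Int), Dom_check_condition_optimized N K M x → Pre_check_condition_optimized N K M x → Spec_check_condition_optimized N K M x (check_condition_optimized N K M x)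

-- ===== LEMMAS AND PROOFS =====

-- reference day counter: one day at a time, paying max(remains//x, M)
def pvT (M x r : Int) : Nat :=
  if h : 0 < r then
    let q := PySem.Int.floordiv r x
    let pay := if M < q then q else M
    if h2 : r - pay < r then pvT M x (r - pay) + 1 else 0
  else 0
termination_by r.toNat
decreasing_by simp only [pay, q] at h2; omega

lemma pvT_nonpos (M x r : Int) (h : ¬ 0 < r) : pvT M x r = 0 := by
  rw [pvT.eq_1]; simp [h]

lemma pvT_step (M x r : Int) (hM : 1 ≤ M) (hr : 0 < r) :
    pvT M x r = pvT M x (r - (if M < PySem.Int.floordiv r x then PySem.Int.floordiv r x else M)) + 1 := by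
  rw [pvT.eq_1, dif_pos hr]
  simp only []
  rw [dif_pos (by split_ifs <;> omega)]

lemma pvT_pos (M x r : Int) (hM : 1 ≤ M) (hr : 0 < r) : 1 ≤ pvT M x r := by
  rw [pvT_step M x r hM hr]; omega

lemma pv_fd_neg_of_neg (a x : Int) (ha : 0 < a) (hx : x < 0) :
    PySem.Int.floordiv a x < 0 := by
  have hid := PySem.Int.floordiv_mul_add_mod a x
  have hb := PySem.Int.mod_neg_bounds a hx
  nlinarith [hid, hb.1, hb.2]

lemma pv_x_pos (r x : Int) (hr : 0 < r) (hq : 2 ≤ PySem.Int.floordiv r x) : 0 < x := by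
  rcases lt_trichotomy x 0 with h | h | h
  · have := pv_fd_neg_of_neg r x hr h; omega
  · subst h
    have h0 : PySem.Int.floordiv r 0 = 0 := Int.fdiv_zero r
    omega
  · exact h

lemma pv_fd_nonneg (a b : Int) (ha : 0 ≤ a) (hb : 0 < b) :
    0 ≤ PySem.Int.floordiv a b := by
  have := (PySem.Int.le_floordiv_iff_mul_le (a := a) (q := 0) hb).mpr (by omega)
  omega

lemma pv_ceil_one (r M : Int) (hM : 1 ≤ M) (h1 : 0 < r) (h2 : r - M ≤ 0) :
    -(PySem.Int.floordiv (-r) M) = 1 := by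
  rw [PySem.Int.neg_floordiv_neg_eq_iff_of_pos (by omega)]
  constructor <;> nlinarith

lemma pv_ceil_succ (r M : Int) (hM : 1 ≤ M) (h : 0 < r - M) :
    -(PySem.Int.floordiv (-r) M) = -(PySem.Int.floordiv (-(r - M)) M) + 1 := by
  have hb := (PySem.Int.neg_floordiv_neg_eq_iff_of_pos (a := r - M) (b := M)
      (q := -(PySem.Int.floordiv (-(r - M)) M)) (by omega)).mp rfl
  rw [PySem.Int.neg_floordiv_neg_eq_iff_of_pos (by omega)]
  constructor <;> nlinarith [hb.1, hb.2]

lemma pv_ceil_eq_floor_add (r M : Int) (hr : 0 < r) (hM : 1 ≤ M) :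
    -(PySem.Int.floordiv (-r) M)
      = PySem.Int.floordiv r M + (if PySem.Int.mod r M ≠ 0 then 1 else 0) := by
  have hid := PySem.Int.floordiv_mul_add_mod r M
  have hm0 := PySem.Int.mod_nonneg r (b := M) (by omega)
  have hm1 := PySem.Int.mod_lt r (b := M) (by omega)
  rw [PySem.Int.neg_floordiv_neg_eq_iff_of_pos (by omega)]
  by_cases h : PySem.Int.mod r M = 0
  · simp only [h, ne_eq, not_true_eq_false, if_false, add_zero]
    constructor <;> nlinarith
  · simp only [h, ne_eq, not_false_eq_true, if_true]
    have hm2 : 1 ≤ PySem.Int.mod r M := by omega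
    constructor <;> nlinarith

lemma pv_q_drop (r M x : Int) (hM : 1 ≤ M) (h0 : 0 < r - M)
    (hq : PySem.Int.floordiv r x ≤ M) : PySem.Int.floordiv (r - M) x ≤ M := by
  rcases lt_trichotomy x 0 with h | h | h
  · have := pv_fd_neg_of_neg (r - M) x h0 h; omega
  · subst h
    have h0' : PySem.Int.floordiv (r - M) 0 = 0 := Int.fdiv_zero _
    omega
  · by_contra hc
    push_neg at hc
    have h1 : (M + 1) * x ≤ r - M :=
      (PySem.Int.le_floordiv_iff_mul_le (a := r - M) (q := M + 1) h).mp (by omega)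
    have h2 : r < (M + 1) * x := by
      by_contra h2
      push_neg at h2
      have := (PySem.Int.le_floordiv_iff_mul_le (a := r) (q := M + 1) h).mpr h2
      omega
    omega

lemma pv_T_ceil (M x : Int) (hM : 1 ≤ M) : ∀ n : Nat, ∀ r : Int, r.toNat ≤ n → 0 < r →
    PySem.Int.floordiv r x ≤ M → (pvT M x r : Int) = -(PySem.Int.floordiv (-r) M) := by
  intro n
  induction n with
  | zero => intro r h1 h2; omega
  | succ n ih =>
    intro r h1 h2 hq
    rw [pvT.eq_1, dif_pos h2]
    simp only []
    rw [if_neg (show ¬ M < PySem.Int.floordiv r x by omega)]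
    rw [dif_pos (show r - M < r by omega)]
    by_cases hrm : 0 < r - M
    · have hih := ih (r - M) (by omega) hrm (pv_q_drop r M x hM hrm hq)
      push_cast
      rw [hih, pv_ceil_succ r M hM hrm]
    · rw [pvT_nonpos M x (r - M) hrm]
      rw [pv_ceil_one r M hM h2 (by omega)]
      simp

lemma pv_T_block (M x r : Int) (hM : 1 ≤ M) (hr : 0 < r)
    (hq : M < PySem.Int.floordiv r x) :
    ∀ j : Nat, (j : Int) ≤ PySem.Int.floordiv (PySem.Int.mod r x) (PySem.Int.floordiv r x) + 1 →
      (pvT M x r : Int) = j + pvT M x (r - PySem.Int.floordiv r x * j) := by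
  have hq2 : 2 ≤ PySem.Int.floordiv r x := by omega
  have hx : 0 < x := pv_x_pos r x hr hq2
  have hre : PySem.Int.floordiv r x * x + PySem.Int.mod r x = r :=
    PySem.Int.floordiv_mul_add_mod r x
  have he0 : 0 ≤ PySem.Int.mod r x := PySem.Int.mod_nonneg r hx
  have he1 : PySem.Int.mod r x < x := PySem.Int.mod_lt r hx
  have hec : PySem.Int.floordiv (PySem.Int.mod r x) (PySem.Int.floordiv r x) * PySem.Int.floordiv r x
      + PySem.Int.mod (PySem.Int.mod r x) (PySem.Int.floordiv r x) = PySem.Int.mod r x :=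
    PySem.Int.floordiv_mul_add_mod _ _
  have hf0 : 0 ≤ PySem.Int.mod (PySem.Int.mod r x) (PySem.Int.floordiv r x) :=
    PySem.Int.mod_nonneg _ (by omega)
  have hf1 : PySem.Int.mod (PySem.Int.mod r x) (PySem.Int.floordiv r x) < PySem.Int.floordiv r x :=
    PySem.Int.mod_lt _ (by omega)
  set q := PySem.Int.floordiv r x with hqdef
  set e := PySem.Int.mod r x with hedef
  set c := PySem.Int.floordiv e q with hcdef
  set f := PySem.Int.mod e q with hfdef
  intro j
  induction j with
  | zero => intro _; simp
  | succ j ih =>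
    intro hj
    push_cast at hj
    have hjc : (j : Int) ≤ c := by omega
    have hqj : q * j ≤ q * c := mul_le_mul_of_nonneg_left hjc (by omega)
    have hj0 : (0:Int) ≤ q * j := mul_nonneg (by omega) (by positivity)
    rw [ih (by omega)]
    have hrj0 : 0 < r - q * j := by nlinarith
    have hrjq : PySem.Int.floordiv (r - q * j) x = q := by
      rw [PySem.Int.floordiv_eq_iff_of_pos hx]
      constructor
      · nlinarith
      · nlinarith
    rw [pvT.eq_1, dif_pos hrj0]
    simp only []
    rw [hrjq, if_pos hq, dif_pos (show r - q * j - q < r - q * j by omega)]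
    have harg : r - q * ↑j - q = r - q * ((j:Int) + 1) := by ring
    rw [harg]
    push_cast
    ring

lemma pvALoop_nonpos (f : Nat) (K M x r d : Int) (hf : 0 < f) (h : ¬ 0 < r) :
    pvALoop f K M x r d = true := by
  match f with
  | 0 => omega
  | f + 1 => simp [pvALoop, h]

lemma pvBLoop_nonpos (f : Nat) (K M x r d : Int) (hf : 0 < f) (h : ¬ 0 < r) :
    pvBLoop f K M x r d = true := by
  match f with
  | 0 => omega
  | f + 1 => simp [pvBLoop, h]

lemma pv_aLoop_spec (K M x : Int) (hM : 1 ≤ M) : ∀ n : Nat, ∀ r d : Int, r.toNat < n →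
    0 < r → pvALoop n K M x r d = decide (d + pvT M x r ≤ K) := by
  intro n
  induction n with
  | zero => intro r d h1 h2; omega
  | succ n ih =>
    intro r d h1 h2
    show (if 0 < r then _ else true) = _
    rw [if_pos h2]
    simp only []
    by_cases hy : PySem.Int.floordiv r x ≤ M
    · rw [if_pos hy]
      have hT := pv_T_ceil M x hM (n+1) r (by omega) h2 hy
      rw [pv_ceil_eq_floor_add r M h2 hM] at hT
      by_cases hm : PySem.Int.mod r M ≠ 0
      · rw [if_pos hm] at *
        simp only [decide_eq_decide]
        omega
      · rw [if_neg hm] at *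
        simp only [decide_eq_decide]
        omega
    · rw [if_neg hy]
      have hq : M < PySem.Int.floordiv r x := by omega
      have hq2 : 2 ≤ PySem.Int.floordiv r x := by omega
      have hx : 0 < x := pv_x_pos r x h2 hq2
      have hre : PySem.Int.floordiv r x * x + PySem.Int.mod r x = r :=
        PySem.Int.floordiv_mul_add_mod r x
      have hextra : r - PySem.Int.floordiv r x * x = PySem.Int.mod r x := by omega
      rw [hextra]
      have he0 : 0 ≤ PySem.Int.mod r x := PySem.Int.mod_nonneg r hx
      have hc0 : 0 ≤ PySem.Int.floordiv (PySem.Int.mod r x) (PySem.Int.floordiv r x) :=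
        pv_fd_nonneg _ _ he0 (by omega)
      set y := PySem.Int.floordiv r x with hydef
      set e := PySem.Int.mod r x with hedef
      set c := PySem.Int.floordiv e y with hcdef
      set df1 := if PySem.Int.mod e y = 0 then c + 1 else c with hdf1def
      set df := if df1 = 0 then 1 else df1 with hdfdef
      have hdf_lb : 1 ≤ df := by rw [hdfdef, hdf1def]; split_ifs <;> omega
      have hdf_ub : df ≤ c + 1 := by rw [hdfdef, hdf1def]; split_ifs <;> omega
      have hblock := pv_T_block M x r hM h2 hq df.toNat
        (by rw [← hedef, ← hydef, ← hcdef]; push_cast; omega)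
      rw [← hydef] at hblock
      have hcast : ((df.toNat : Int)) = df := by omega
      rw [hcast] at hblock
      have hnn : (0:Int) ≤ (pvT M x (r - y * df) : Int) := by positivity
      by_cases hk : d + df > K
      · rw [if_pos hk]
        symm
        rw [decide_eq_false_iff_not]
        omega
      · rw [if_neg hk]
        have hydf : y * 1 ≤ y * df := mul_le_mul_of_nonneg_left hdf_lb (by omega)
        have hlt : r - y * df < r := by nlinarith
        by_cases hr' : 0 < r - y * df
        · rw [ih (r - y * df) (d + df) (by omega) hr']
          simp only [decide_eq_decide]
          omega
        · rw [pvALoop_nonpos n K M x _ _ (by omega) hr']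
          rw [pvT_nonpos M x _ hr'] at hblock
          symm
          rw [decide_eq_true_iff]
          omega

lemma pv_bLoop_spec (K M x : Int) (hM : 1 ≤ M) : ∀ n : Nat, ∀ r d : Int, r.toNat < n →
    0 < r → pvBLoop n K M x r d = decide (d + pvT M x r ≤ K) := by
  intro n
  induction n with
  | zero => intro r d h1 h2; omega
  | succ n ih =>
    intro r d h1 h2
    show (if 0 < r then _ else true) = _
    rw [if_pos h2]
    simp only []
    have hpos := pvT_pos M x r hM h2
    by_cases hk : d + 1 > K
    · rw [if_pos hk]
      symm
      rw [decide_eq_false_iff_not]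
      omega
    · rw [if_neg hk]
      set q := PySem.Int.floordiv r x with hqdef
      set pay := if q > M then q else M with hpaydef
      have hpayT : pay = if M < q then q else M := rfl
      have hstep := pvT_step M x r hM h2
      rw [← hqdef, ← hpayT] at hstep
      have hpay1 : 1 ≤ pay := by rw [hpaydef]; split_ifs <;> omega
      by_cases hr' : 0 < r - pay
      · rw [ih (r - pay) (d + 1) (by omega) hr']
        simp only [decide_eq_decide]
        omega
      · rw [pvBLoop_nonpos n K M x _ _ (by omega) hr']
        rw [pvT_nonpos M x _ hr'] at hstep
        symm
        rw [decide_eq_true_iff]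
        omega

-- ===== VERDICT (by name: the statement is the Claim_ definition above) =====
theorem check_condition_optimized_spec : Claim_equal_check_condition_optimized := by
  unfold Claim_equal_check_condition_optimized
  intro N K M x hDom hPre
  unfold Spec_check_condition_optimized check_condition_optimized check_condition_optimized_alt
  by_cases hN : 0 < N
  · rcases hPre with h0 | ⟨hM, _⟩
    · omega
    · rw [pv_aLoop_spec K M x hM (N.toNat + 1) N 0 (by omega) hN,
          pv_bLoop_spec K M x hM (N.toNat + 1) N 0 (by omega) hN]
  · rw [pvALoop_nonpos (N.toNat + 1) K M x N 0 (by omega) hN,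
        pvBLoop_nonpos (N.toNat + 1) K M x N 0 (by omega) hN]
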